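-- pv_equiv track=rewrite | github.com/joseamaury/python-exercises | word_counter_py/word_counter.py | count_text_metrics
-- ===== SOURCE A (Python) =====
-- def count_text_metrics(text: str) -> dict:
--     # Calculate basic text metrics
--     chars_total = len(text)
--     chars_no_spaces = len(text.replace(" ", ""))
--     words = len(text.split())
--     lines = 0 if not text else text.count("\n") + 1
--     sentences = sum(text.count(p) for p in (".", "!", "?"))
--
--     return {
--         "chars_total": chars_total,
--         "chars_no_spaces": chars_no_spaces,
--         "words": words,
--         "lines": lines,
--         "sentences": sentences,
--     }
-- ===== SOURCE B (Python) =====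
-- def count_text_metrics(text: str) -> dict:
--     # single pass over the characters maintaining all counters
--     no_spaces = 0
--     words = 0
--     in_word = False
--     newlines = 0
--     sentences = 0
--     for ch in text:
--         if ch != ' ':
--             no_spaces += 1
--         sp = ch.isspace()
--         if not sp and not in_word:
--             words += 1
--         if ch == '\n':
--             newlines += 1
--         if ch == '.' or ch == '!' or ch == '?':
--             sentences += 1
--         in_word = not sp
--     return {
--         "chars_total": len(text),
--         "chars_no_spaces": no_spaces,
--         "words": words,
--         "lines": 0 if not text else newlines + 1,
--         "sentences": sentences,
--     }
-- ===== Notes on version B (the rewrite author's own statement) =====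
-- stated objective: alternative
-- what changed: A makes several separate whole-string passes (len, replace-then-len, split, a newline count and three punctuation counts); B makes a single pass over the characters maintaining all counters at once, with the word count kept via an in-word boundary flag instead of materialising the split list.
import Mathlib
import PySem

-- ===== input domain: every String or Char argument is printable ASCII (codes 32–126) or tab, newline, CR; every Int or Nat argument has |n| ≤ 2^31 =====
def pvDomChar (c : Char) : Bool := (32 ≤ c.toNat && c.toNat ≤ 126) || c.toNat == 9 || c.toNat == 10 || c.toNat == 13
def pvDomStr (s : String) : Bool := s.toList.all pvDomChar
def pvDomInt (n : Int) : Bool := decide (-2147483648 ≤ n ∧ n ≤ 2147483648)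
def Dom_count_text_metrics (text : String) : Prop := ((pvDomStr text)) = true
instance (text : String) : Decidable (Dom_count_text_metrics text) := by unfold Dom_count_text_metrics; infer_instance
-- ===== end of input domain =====

-- B replaces A's five whole-string passes (len/replace/split/count×4) by ONE loop over the
-- characters maintaining all counters (objective: alternative decomposition, same cost class).

-- ===== PORT A =====
def count_text_metrics (text : String) : List (String × Int) :=
  let chars_total : Int := PySem.Str.len text
  let chars_no_spaces : Int := PySem.Str.len (PySem.Str.replace text " " "")
  let words : Int := ((PySem.Str.split₀ text).length : Int)
  let lines : Int := if text.toList.isEmpty then 0 else (PySem.Str.count text "\n" : Int) + 1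
  let sentences : Int :=
    (PySem.Str.count text "." : Int) + (PySem.Str.count text "!" : Int) + (PySem.Str.count text "?" : Int)
  [("chars_total", chars_total), ("chars_no_spaces", chars_no_spaces),
   ("words", words), ("lines", lines), ("sentences", sentences)]

-- ===== PORT B =====
-- state: (no_spaces, words, in_word, newlines, sentences)
def pvCountLoop : List Char → Int × Int × Bool × Int × Int → Int × Int × Bool × Int × Int
  | [], st => st
  | c :: rest, (ns, w, inw, nl, se) =>
    let ns := if c != ' ' then ns + 1 else ns
    let sp := PySem.Chars.isspace c
    let w := if !sp && !inw then w + 1 else w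
    let nl := if c == '\n' then nl + 1 else nl
    let se := if c == '.' || c == '!' || c == '?' then se + 1 else se
    pvCountLoop rest (ns, w, !sp, nl, se)

def count_text_metrics_alt (text : String) : List (String × Int) :=
  let cs := text.toList
  let st := pvCountLoop cs (0, 0, false, 0, 0)
  let lines : Int := if cs.isEmpty then 0 else st.2.2.2.1 + 1
  [("chars_total", (cs.length : Int)), ("chars_no_spaces", st.1),
   ("words", st.2.1), ("lines", lines), ("sentences", st.2.2.2.2)]

-- ===== PRECONDITION & SPEC =====
def Spec_count_text_metrics (text : String) (out : List (String × Int)) : Prop := out = count_text_metrics_alt text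
instance (text : String) (out : List (String × Int)) : Decidable (Spec_count_text_metrics text out) := by unfold Spec_count_text_metrics; infer_instance

-- ===== CLAIM (what is proved, stated in full; the proofs are below) =====
def Claim_equal_count_text_metrics : Prop := ∀ (text : String), Dom_count_text_metrics text → Spec_count_text_metrics text (count_text_metrics text)

-- ===== LEMMAS AND PROOFS =====

-- number of words str.split() finds in cs, given whether we are already inside a word
def pvRuns : List Char → Bool → Nat
  | [], _ => 0
  | c :: t, inw =>
    if PySem.Chars.isspace c then pvRuns t false
    else (if inw then 0 else 1) + pvRuns t true

-- whether we are inside a word after consuming cs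
def pvEndsIn : List Char → Bool → Bool
  | [], inw => inw
  | c :: t, _ => pvEndsIn t (!PySem.Chars.isspace c)

lemma pvReplaceGoLen (fuel : Nat) (cs acc : List Char) (h : cs.length ≤ fuel) :
    (PySem.Chars.replace.go [' '] [] fuel cs acc).length
      = acc.length + cs.countP (fun c => c != ' ') := by
  induction fuel generalizing cs acc with
  | zero =>
    cases cs with
    | nil => simp [PySem.Chars.replace.go]
    | cons c t => simp at h
  | succ n ih =>
    cases cs with
    | nil => simp [PySem.Chars.replace.go]
    | cons c t =>
      have hlen : t.length ≤ n := by simpa using Nat.le_of_succ_le_succ h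
      by_cases hc : c = ' '
      · subst hc
        simp [PySem.Chars.replace.go, List.isPrefixOf, ih t acc hlen]
      · simp [PySem.Chars.replace.go, List.isPrefixOf, Ne.symm hc,
          ih t (c :: acc) hlen, hc]
        omega

lemma pvCountGoSingleton (v : Char) (fuel : Nat) (cs : List Char) (acc : Nat)
    (h : cs.length ≤ fuel) :
    PySem.Chars.count.go [v] fuel cs acc = acc + cs.count v := by
  induction fuel generalizing cs acc with
  | zero =>
    cases cs with
    | nil => simp [PySem.Chars.count.go]
    | cons c t => simp at h
  | succ n ih =>
    cases cs with
    | nil => simp [PySem.Chars.count.go]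
    | cons c t =>
      have hlen : t.length ≤ n := by simpa using Nat.le_of_succ_le_succ h
      by_cases hc : v = c
      · subst hc
        simp [PySem.Chars.count.go, List.isPrefixOf, ih t (acc + 1) hlen]
        omega
      · simp [PySem.Chars.count.go, List.isPrefixOf, Ne.symm hc, hc,
          ih t acc hlen]

lemma pvCountSingleton (cs : List Char) (v : Char) :
    PySem.Chars.count cs [v] = cs.count v := by
  simp only [PySem.Chars.count, List.isEmpty_cons, Bool.false_eq_true, if_false]
  simpa using pvCountGoSingleton v cs.length cs 0 (le_refl _)

lemma pvSplitGoLen (cs cur : List Char) (acc : List (List Char)) :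
    (PySem.Chars.split₀.go cs cur acc).length
      = acc.length + (if cur.isEmpty then 0 else 1) + pvRuns cs (!cur.isEmpty) := by
  induction cs generalizing cur acc with
  | nil =>
    by_cases hc : cur.isEmpty <;> simp [PySem.Chars.split₀.go, pvRuns, hc]
  | cons c t ih =>
    by_cases hs : PySem.Chars.isspace c
    · by_cases hc : cur.isEmpty
      · simp [PySem.Chars.split₀.go, pvRuns, hs, hc, ih [] acc]
      · simp [PySem.Chars.split₀.go, pvRuns, hs, hc, ih [] (cur.reverse :: acc)]
    · by_cases hc : cur.isEmpty
      · simp [PySem.Chars.split₀.go, pvRuns, hs, hc, ih (c :: cur) acc]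
        omega
      · simp [PySem.Chars.split₀.go, pvRuns, hs, hc, ih (c :: cur) acc]

lemma pvSplitLen (cs : List Char) :
    (PySem.Chars.split₀ cs).length = pvRuns cs false := by
  simpa using pvSplitGoLen cs [] []

lemma pvCountPTri (cs : List Char) :
    (cs.countP (fun c => c == '.' || c == '!' || c == '?'))
      = cs.count '.' + cs.count '!' + cs.count '?' := by
  induction cs with
  | nil => simp
  | cons c t ih =>
    simp only [List.countP_cons, List.count_cons, ih]
    by_cases h1 : c = '.' <;> by_cases h2 : c = '!' <;> by_cases h3 : c = '?' <;>
      simp_all <;> omega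

lemma pvCountLoopSpec (cs : List Char) (ns w : Int) (inw : Bool) (nl se : Int) :
    pvCountLoop cs (ns, w, inw, nl, se)
      = (ns + (cs.countP (fun c => c != ' ') : Int),
         w + (pvRuns cs inw : Int),
         pvEndsIn cs inw,
         nl + (cs.count '\n' : Int),
         se + (cs.countP (fun c => c == '.' || c == '!' || c == '?') : Int)) := by
  induction cs generalizing ns w inw nl se with
  | nil => simp [pvCountLoop, pvRuns, pvEndsIn]
  | cons c t ih =>
    simp only [pvCountLoop, ih, pvRuns, pvEndsIn, List.countP_cons, List.count_cons]
    refine Prod.ext ?_ (Prod.ext ?_ (Prod.ext rfl (Prod.ext ?_ ?_)))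
    · by_cases hc : c = ' ' <;> simp [hc]; ring
    · by_cases hs : PySem.Chars.isspace c
      · simp [hs]
      · cases inw <;> simp [hs]; ring
    · by_cases hc : c = '\n' <;> simp [hc]; ring
    · by_cases hp : (c == '.' || c == '!' || c == '?') = true <;> simp [hp]; ring

lemma pvReplaceSpaceLen (cs : List Char) :
    (PySem.Chars.replace cs [' '] []).length = cs.countP (fun c => c != ' ') := by
  simp only [PySem.Chars.replace, List.isEmpty_cons, Bool.false_eq_true, if_false]
  simpa using pvReplaceGoLen cs.length cs [] (le_refl _)

-- ===== VERDICT (by name: the statement is the Claim_ definition above) =====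
theorem count_text_metrics_spec : Claim_equal_count_text_metrics := by
  intro text _
  unfold Spec_count_text_metrics count_text_metrics count_text_metrics_alt
  simp only [pvCountLoopSpec, zero_add]
  simp [pvReplaceSpaceLen, pvCountSingleton, pvSplitLen, pvCountPTri, PySem.Str.len,
    PySem.Str.replace, PySem.Str.split₀, PySem.Str.count]
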